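-- pv_equiv track=rewrite | github.com/pypi-data/pypi-mirror-378 | packages/kdotpy/kdotpy-1.3.0-py3-none-any.whl/kdotpy/phystext.py | is_known_vector
-- ===== SOURCE A (Python) =====
-- def is_known_vector(q):
-- 	for x in ['k', 'b', 'a']:
-- 		if q.startswith(x):
-- 			prefix = x
-- 			break
-- 	else:
-- 		return False
-- 	if q == prefix:
-- 		return True
-- 	q2 = q[len(prefix):]
-- 	return q2 in ['r', 'x', 'y', 'z', 'phi', 'theta']
-- ===== SOURCE B (Python) =====
-- KNOWN_VECTORS = frozenset([
--     'k', 'kr', 'kx', 'ky', 'kz', 'kphi', 'ktheta',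
--     'b', 'br', 'bx', 'by', 'bz', 'bphi', 'btheta',
--     'a', 'ar', 'ax', 'ay', 'az', 'aphi', 'atheta',
-- ])
--
-- def is_known_vector(q):
--     return q in KNOWN_VECTORS
-- ===== Notes on version B (the rewrite author's own statement) =====
-- stated objective: simpler
-- what changed: Replaced the prefix-scan with break/else, slicing off the prefix and testing the suffix against a list, by a single membership test of q in a precomputed constant set of all 21 valid vector names.
import Mathlib
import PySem

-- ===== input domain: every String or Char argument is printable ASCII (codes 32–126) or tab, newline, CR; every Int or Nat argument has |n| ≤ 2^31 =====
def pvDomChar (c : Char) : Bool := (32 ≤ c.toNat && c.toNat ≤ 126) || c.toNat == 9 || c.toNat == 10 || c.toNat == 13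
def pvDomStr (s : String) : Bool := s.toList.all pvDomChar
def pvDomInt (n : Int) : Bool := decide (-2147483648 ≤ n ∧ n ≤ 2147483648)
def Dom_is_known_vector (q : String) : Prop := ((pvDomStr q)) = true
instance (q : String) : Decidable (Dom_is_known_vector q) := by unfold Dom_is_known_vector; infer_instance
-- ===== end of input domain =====

-- B replaces A's prefix-scan + slice + suffix membership by a single lookup in a
-- precomputed constant set of all 21 valid vector names (objective: simpler).


-- ===== PORT A =====
-- the 'for x in [...]: if q.startswith(x): prefix = x; break / else: return False' loop
def pvFindPrefix (q : String) : List String → Option String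
  | [] => none
  | x :: xs => if PySem.Str.startswith q x then some x else pvFindPrefix q xs

def is_known_vector (q : String) : Bool :=
  match pvFindPrefix q ["k", "b", "a"] with
  | none => false
  | some pfx =>
    if q == pfx then true
    else
      let q2 := PySem.Str.slice q (some (PySem.Str.len pfx)) none
      ["r", "x", "y", "z", "phi", "theta"].contains q2

-- ===== PORT B =====
-- B's constant KNOWN_VECTORS frozenset (the 21 names, prefix-major as the comprehension yields them)
def knownVectors : PySem.Set String := PySem.Set.ofList
  ["k", "kr", "kx", "ky", "kz", "kphi", "ktheta",
   "b", "br", "bx", "by", "bz", "bphi", "btheta",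
   "a", "ar", "ax", "ay", "az", "aphi", "atheta"]

def is_known_vector_alt (q : String) : Bool := PySem.Set.contains knownVectors q

-- ===== PRECONDITION & SPEC =====
def Spec_is_known_vector (q : String) (out : Bool) : Prop := out = is_known_vector_alt q
instance (q : String) (out : Bool) : Decidable (Spec_is_known_vector q out) := by unfold Spec_is_known_vector; infer_instance

-- ===== CLAIM (what is proved, stated in full; the proofs are below) =====
def Claim_equal_is_known_vector : Prop := ∀ (q : String), Dom_is_known_vector q → Spec_is_known_vector q (is_known_vector q)

-- ===== LEMMAS AND PROOFS =====
lemma ofList_eq_str (l : List Char) (s : String) : (String.ofList l = s) ↔ (l = s.toList) := by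
  constructor
  · intro h; rw [← h]; simp
  · intro h; rw [h]; simp

lemma startswith_chars_cons (c : Char) (r : List Char) (p : Char) :
    PySem.Chars.startswith (c :: r) [p] = (c == p) := by
  simp [PySem.Chars.startswith, List.isPrefixOf, eq_comm]

lemma slice_one_ofList_cons (c : Char) (r : List Char) :
    PySem.Str.slice (String.ofList (c :: r)) (some 1) none = String.ofList r := by
  rw [← String.toList_inj]
  simp [PySem.Str.toList_slice, PySem.List.slice_from_one]

lemma is_known_vector_ofList_eq (l : List Char) :
    is_known_vector (String.ofList l) = is_known_vector_alt (String.ofList l) := by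
  cases l with
  | nil => decide
  | cons c r =>
    by_cases hk : c = 'k'
    · subst hk
      simp [is_known_vector, is_known_vector_alt, pvFindPrefix, knownVectors,
        startswith_chars_cons, ofList_eq_str, slice_one_ofList_cons,
        PySem.Set.contains, List.contains_eq_mem, PySem.Set.mem_ofList]
    · by_cases hb : c = 'b'
      · subst hb
        simp [is_known_vector, is_known_vector_alt, pvFindPrefix, knownVectors,
          startswith_chars_cons, ofList_eq_str, slice_one_ofList_cons,
          PySem.Set.contains, List.contains_eq_mem, PySem.Set.mem_ofList]
      · by_cases ha : c = 'a'
        · subst ha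
          simp [is_known_vector, is_known_vector_alt, pvFindPrefix, knownVectors,
            startswith_chars_cons, ofList_eq_str, slice_one_ofList_cons,
            PySem.Set.contains, List.contains_eq_mem, PySem.Set.mem_ofList]
        · simp [is_known_vector, is_known_vector_alt, pvFindPrefix, knownVectors,
            startswith_chars_cons, ofList_eq_str, hk, hb, ha,
            PySem.Set.contains, List.contains_eq_mem, PySem.Set.mem_ofList]

-- ===== VERDICT (by name: the statement is the Claim_ definition above) =====
theorem is_known_vector_spec : Claim_equal_is_known_vector := by
  intro q _
  unfold Spec_is_known_vector
  rw [← @String.ofList_toList q]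
  exact is_known_vector_ofList_eq q.toList
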